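-- pv_equiv track=rewrite | github.com/equinor/dot | api/src/v0/services/reporting_utils/markdown_objective.py | group_objectives
-- ===== SOURCE A (Python) =====
-- def group_objectives(data: list) -> dict:
--     """Group objectives by category
--
--     Args:
--         data (list): opportunity data from database
--
--     Returns:
--         dict: objectives grouped by category.
--     """
--     grouped = {
--         "Strategic": [item for item in data if item["hierarchy"] == "Strategic"],
--         "Fundamental": [item for item in data if item["hierarchy"] == "Fundamental"],
--         "Mean": [item for item in data if item["hierarchy"] == "Mean"],
--         "Uncategorized": [
--             item
--             for item in data
--             if item["hierarchy"] not in ["Strategic", "Fundamental", "Mean"]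
--         ],
--     }
--     return grouped
-- ===== SOURCE B (Python) =====
-- def group_objectives(data: list) -> dict:
--     """Group objectives by category in a single pass over the data."""
--     grouped = {"Strategic": [], "Fundamental": [], "Mean": [], "Uncategorized": []}
--     for item in data:
--         h = item["hierarchy"]
--         if h in ("Strategic", "Fundamental", "Mean"):
--             grouped[h].append(item)
--         else:
--             grouped["Uncategorized"].append(item)
--     return grouped
-- ===== Notes on version B (the rewrite author's own statement) =====
-- stated objective: idiomatic
-- what changed: Replaces four separate comprehension scans of data (one per category) with a single loop that dispatches each item into one of four pre-initialized lists.
import Mathlib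
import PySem

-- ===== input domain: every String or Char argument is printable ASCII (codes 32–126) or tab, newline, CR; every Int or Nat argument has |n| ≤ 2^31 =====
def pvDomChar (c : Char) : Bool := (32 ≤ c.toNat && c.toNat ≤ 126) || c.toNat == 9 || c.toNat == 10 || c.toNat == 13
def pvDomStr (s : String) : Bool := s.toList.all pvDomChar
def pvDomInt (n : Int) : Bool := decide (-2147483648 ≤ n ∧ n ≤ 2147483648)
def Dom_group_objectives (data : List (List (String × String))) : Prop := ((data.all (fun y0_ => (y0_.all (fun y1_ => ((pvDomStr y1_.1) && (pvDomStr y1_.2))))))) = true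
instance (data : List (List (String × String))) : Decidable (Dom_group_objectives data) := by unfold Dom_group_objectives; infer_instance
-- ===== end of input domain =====

-- B groups the items in ONE pass with a branch dispatch instead of A's four comprehension scans; identical output (same keys, same order).

-- ===== PORT A =====
-- item["hierarchy"]: first match in the association list; the "" default is only
-- reached where Python raises KeyError, which Pre_group_objectives excludes.
def hGet (item : List (String × String)) : String :=
  ((item.find? (fun p => p.1 == "hierarchy")).map Prod.snd).getD ""

def group_objectives (data : List (List (String × String))) : List (String × List (List (String × String))) :=
  [ ("Strategic",   data.filter (fun it => hGet it == "Strategic")),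
    ("Fundamental", data.filter (fun it => hGet it == "Fundamental")),
    ("Mean",        data.filter (fun it => hGet it == "Mean")),
    ("Uncategorized", data.filter (fun it => !(["Strategic", "Fundamental", "Mean"].contains (hGet it)))) ]

-- ===== PORT B =====
def gLoop (l : List (List (String × String)))
    (s f m u : List (List (String × String))) :
    List (List (String × String)) × List (List (String × String)) × List (List (String × String)) × List (List (String × String)) :=
  match l with
  | [] => (s, f, m, u)
  | it :: rest =>
    let h := hGet it
    if h == "Strategic" then gLoop rest (s ++ [it]) f m u
    else if h == "Fundamental" then gLoop rest s (f ++ [it]) m u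
    else if h == "Mean" then gLoop rest s f (m ++ [it]) u
    else gLoop rest s f m (u ++ [it])

def group_objectives_alt (data : List (List (String × String))) : List (String × List (List (String × String))) :=
  match gLoop data [] [] [] [] with
  | (s, f, m, u) => [("Strategic", s), ("Fundamental", f), ("Mean", m), ("Uncategorized", u)]

-- ===== PRECONDITION & SPEC =====
-- Pre_ excludes exactly the inputs where an item lacks a "hierarchy" key, on which Python A raises KeyError.
def Pre_group_objectives (data : List (List (String × String))) : Prop :=
  (data.all (fun it => it.any (fun p => p.1 == "hierarchy"))) = true
instance (data : List (List (String × String))) : Decidable (Pre_group_objectives data) := by unfold Pre_group_objectives; infer_instance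

def pvWitness_group_objectives : (List (List (String × String))) :=
  [[("hierarchy", "Strategic"), ("name", "o1")], [("hierarchy", "Other")]]

def Spec_group_objectives (data : List (List (String × String))) (out : List (String × List (List (String × String)))) : Prop := out = group_objectives_alt data
instance (data : List (List (String × String))) (out : List (String × List (List (String × String)))) : Decidable (Spec_group_objectives data out) := by unfold Spec_group_objectives; infer_instance

-- ===== CLAIM (what is proved, stated in full; the proofs are below) =====
def Claim_equal_group_objectives : Prop := ∀ (data : List (List (String × String))), Dom_group_objectives data → Pre_group_objectives data → Spec_group_objectives data (group_objectives data)

-- ===== LEMMAS AND PROOFS =====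
lemma gLoop_spec (l : List (List (String × String)))
    (s f m u : List (List (String × String))) :
    gLoop l s f m u =
      (s ++ l.filter (fun it => hGet it == "Strategic"),
       f ++ l.filter (fun it => hGet it == "Fundamental"),
       m ++ l.filter (fun it => hGet it == "Mean"),
       u ++ l.filter (fun it => !(["Strategic", "Fundamental", "Mean"].contains (hGet it)))) := by
  induction l generalizing s f m u with
  | nil => simp [gLoop]
  | cons it rest ih =>
    simp only [gLoop]
    by_cases h1 : hGet it = "Strategic"
    · simp [h1, ih, List.filter_cons]
    · by_cases h2 : hGet it = "Fundamental"
      · simp [h1, h2, ih, List.filter_cons]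
      · by_cases h3 : hGet it = "Mean"
        · simp [h1, h2, h3, ih, List.filter_cons]
        · simp [h1, h2, h3, ih]

-- ===== VERDICT (by name: the statement is the Claim_ definition above) =====
theorem group_objectives_spec : Claim_equal_group_objectives := by
  intro data _ _
  unfold Spec_group_objectives group_objectives group_objectives_alt
  rw [gLoop_spec]
  simp
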